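-- pv_equiv track=rewrite | github.com/bb511/ADatL1 | src/models/components/masking.py | _build_particle_slices
-- ===== SOURCE A (Python) =====
-- from typing import Dict, List, Optional
--
-- def _build_particle_slices(constituents: Dict, objects_features: Dict) -> Dict:
--     """Dynamically build particle boundaries from data configuration."""
--     slices = {}
--     current_idx = 0
--     for obj_name, features in objects_features.items():
--         n_features = len(features)
--
--         if obj_name in constituents:
--             # Particle objects with multiple constituents
--             n_constituents = sum(constituents[obj_name])
--             particle_slices = []
--             for i in range(n_constituents):
--                 start_idx = current_idx + i * n_features
--                 end_idx = start_idx + n_features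
--                 particle_slices.append((start_idx, end_idx))
--             slices[obj_name] = particle_slices
--             current_idx += n_constituents * n_features
--         else:
--             # Single objects (ET, MET)
--             end_idx = current_idx + n_features
--             slices[obj_name] = [(current_idx, end_idx)]
--             current_idx = end_idx
--
--     return slices
-- ===== SOURCE B (Python) =====
-- def _build_particle_slices(constituents, objects_features):
--     """Build the table back-to-front: precompute the total width, then walk the
--     objects in reverse, subtracting each object's width from the running end."""
--     items = list(objects_features.items())
--     stop = sum((sum(constituents[k]) if k in constituents else 1) * len(v)
--                for k, v in items)
--     rev = []
--     for name, feats in reversed(items):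
--         n = len(feats)
--         count = sum(constituents[name]) if name in constituents else 1
--         stop -= count * n
--         rev.append((name, [(stop + i * n, stop + (i + 1) * n) for i in range(count)]))
--     return dict(reversed(rev))
-- ===== Notes on version B (the rewrite author's own statement) =====
-- stated objective: alternative
-- what changed: A walks the objects forward keeping a running start offset and fills the dict as it goes; B precomputes the total width, walks the objects in reverse subtracting each object's width from a running end offset, collects the entries back-to-front and builds the dict once at the end.
import Mathlib
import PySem

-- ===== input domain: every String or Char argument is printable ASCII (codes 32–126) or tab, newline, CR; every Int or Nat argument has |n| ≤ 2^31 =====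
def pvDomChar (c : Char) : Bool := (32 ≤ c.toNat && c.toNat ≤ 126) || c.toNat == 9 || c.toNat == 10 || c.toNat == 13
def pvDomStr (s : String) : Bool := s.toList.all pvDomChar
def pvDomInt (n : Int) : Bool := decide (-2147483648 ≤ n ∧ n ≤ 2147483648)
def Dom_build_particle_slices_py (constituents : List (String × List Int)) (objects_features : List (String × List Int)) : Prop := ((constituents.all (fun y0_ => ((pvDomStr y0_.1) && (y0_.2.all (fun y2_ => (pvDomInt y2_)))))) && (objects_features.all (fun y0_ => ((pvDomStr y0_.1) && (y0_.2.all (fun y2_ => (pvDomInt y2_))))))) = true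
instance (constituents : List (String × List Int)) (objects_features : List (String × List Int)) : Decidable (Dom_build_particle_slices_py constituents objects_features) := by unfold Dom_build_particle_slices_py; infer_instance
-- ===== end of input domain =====

-- B builds the table back-to-front: it precomputes the total width, then walks the objects in
-- reverse subtracting each object's width from a running end; objective: alternative, not faster.

-- ===== PORT A =====
def build_particle_slices_py (constituents : List (String × List Int)) (objects_features : List (String × List Int)) : List (String × List (Int × Int)) :=
  let cd := PySem.Dict.ofList constituents
  let res := (PySem.Dict.ofList objects_features).items.foldl
    (fun (st : PySem.Dict String (List (Int × Int)) × Int) p =>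
      let slices := st.1
      let current_idx := st.2
      let n_features : Int := (p.2.length : Int)
      if cd.contains p.1 then
        let n_constituents := (cd.getD p.1 []).sum
        let particle_slices := (PySem.List.pyRange 0 n_constituents 1).foldl
          (fun acc i =>
            let start_idx := current_idx + i * n_features
            let end_idx := start_idx + n_features
            acc ++ [(start_idx, end_idx)]) []
        (slices.insert p.1 particle_slices, current_idx + n_constituents * n_features)
      else
        let end_idx := current_idx + n_features
        (slices.insert p.1 [(current_idx, end_idx)], end_idx))
    (PySem.Dict.empty, 0)
  res.1.items

-- ===== PORT B =====
-- Source B: stop = total width; then iterate reversed(items) with stop -= count * n, emitting each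
-- object's slice list by the comprehension [(stop + i*n, stop + (i+1)*n) for i in range(count)];
-- finally dict(reversed(rev)).
def build_particle_slices_py_alt (constituents : List (String × List Int)) (objects_features : List (String × List Int)) : List (String × List (Int × Int)) :=
  let cd := PySem.Dict.ofList constituents
  let items := (PySem.Dict.ofList objects_features).items
  let stop0 : Int := (items.map (fun kv =>
      (if cd.contains kv.1 then (cd.getD kv.1 []).sum else 1) * (kv.2.length : Int))).sum
  let res := items.reverse.foldl
    (fun (st : List (String × List (Int × Int)) × Int) p =>
      let n : Int := (p.2.length : Int)
      let count : Int := if cd.contains p.1 then (cd.getD p.1 []).sum else 1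
      let stop := st.2 - count * n
      (st.1 ++ [(p.1, (PySem.List.pyRange 0 count 1).map
          (fun i => (stop + i * n, stop + (i + 1) * n)))], stop))
    ([], stop0)
  (PySem.Dict.ofList res.1.reverse).items

-- ===== PRECONDITION & SPEC =====
def Spec_build_particle_slices_py (constituents : List (String × List Int)) (objects_features : List (String × List Int)) (out : List (String × List (Int × Int))) : Prop := out = build_particle_slices_py_alt constituents objects_features
instance (constituents : List (String × List Int)) (objects_features : List (String × List Int)) (out : List (String × List (Int × Int))) : Decidable (Spec_build_particle_slices_py constituents objects_features out) := by unfold Spec_build_particle_slices_py; infer_instance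

-- ===== CLAIM (what is proved, stated in full; the proofs are below) =====
def Claim_equal_build_particle_slices_py : Prop := ∀ (constituents : List (String × List Int)) (objects_features : List (String × List Int)), Dom_build_particle_slices_py constituents objects_features → Spec_build_particle_slices_py constituents objects_features (build_particle_slices_py constituents objects_features)

-- ===== LEMMAS AND PROOFS =====

-- the per-object slice count (count = sum(constituents[name]) if present else 1)
def pvCnt (cd : PySem.Dict String (List Int)) (p : String × List Int) : Int :=
  if cd.contains p.1 then (cd.getD p.1 []).sum else 1

-- total width of a list of objects
def pvW (cd : PySem.Dict String (List Int)) (items : List (String × List Int)) : Int :=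
  (items.map (fun p => pvCnt cd p * (p.2.length : Int))).sum

-- the common specification value: the entry list built forward from offset cur
def pvSpec (cd : PySem.Dict String (List Int)) : List (String × List Int) → Int → List (String × List (Int × Int))
  | [], _ => []
  | p :: rest, cur =>
      (p.1, (PySem.List.pyRange 0 (pvCnt cd p) 1).map
          (fun i => (cur + i * (p.2.length : Int), cur + i * (p.2.length : Int) + (p.2.length : Int))))
        :: pvSpec cd rest (cur + pvCnt cd p * (p.2.length : Int))

lemma pvSpec_keys (cd : PySem.Dict String (List Int)) :
    ∀ (items : List (String × List Int)) (cur : Int),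
      (pvSpec cd items cur).map (·.1) = items.map (·.1) := by
  intro items
  induction items with
  | nil => intro cur; rfl
  | cons p rest ih => intro cur; simp [pvSpec, ih]

lemma pvW_append (cd : PySem.Dict String (List Int)) (xs : List (String × List Int)) (q : String × List Int) :
    pvW cd (xs ++ [q]) = pvW cd xs + pvCnt cd q * (q.2.length : Int) := by
  simp [pvW]

lemma pvSpec_append (cd : PySem.Dict String (List Int)) :
    ∀ (xs : List (String × List Int)) (q : String × List Int) (cur : Int),
      pvSpec cd (xs ++ [q]) cur
        = pvSpec cd xs cur
          ++ [(q.1, (PySem.List.pyRange 0 (pvCnt cd q) 1).map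
                (fun i => (cur + pvW cd xs + i * (q.2.length : Int),
                           cur + pvW cd xs + i * (q.2.length : Int) + (q.2.length : Int))))] := by
  intro xs
  induction xs with
  | nil => intro q cur; simp [pvSpec, pvW]
  | cons p rest ih =>
      intro q cur
      simp only [List.cons_append, pvSpec, ih, List.cons_append]
      have h : cur + pvCnt cd p * ((p.2.length : Int)) + pvW cd rest
          = cur + pvW cd (p :: rest) := by simp [pvW]; ring
      rw [h]

-- A's loop appends one spec entry per object (keys fresh and distinct)
lemma pvA (cd : PySem.Dict String (List Int)) :
    ∀ (items : List (String × List Int)) (d : PySem.Dict String (List (Int × Int))) (cur : Int),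
      (∀ p ∈ items, d.contains p.1 = false) → (items.map (·.1)).Nodup →
      (items.foldl
        (fun (st : PySem.Dict String (List (Int × Int)) × Int) p =>
          let slices := st.1
          let current_idx := st.2
          let n_features : Int := (p.2.length : Int)
          if cd.contains p.1 then
            let n_constituents := (cd.getD p.1 []).sum
            let particle_slices := (PySem.List.pyRange 0 n_constituents 1).foldl
              (fun acc i =>
                let start_idx := current_idx + i * n_features
                let end_idx := start_idx + n_features
                acc ++ [(start_idx, end_idx)]) []
            (slices.insert p.1 particle_slices, current_idx + n_constituents * n_features)
          else
            let end_idx := current_idx + n_features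
            (slices.insert p.1 [(current_idx, end_idx)], end_idx))
        (d, cur)).1.items = d.items ++ pvSpec cd items cur := by
  intro items
  induction items with
  | nil => intro d cur _ _; simp [pvSpec]
  | cons p rest ih =>
      intro d cur hfresh hnd
      simp only [List.foldl_cons]
      have hvc : (if cd.contains p.1 = true
            then (d.insert p.1 ((PySem.List.pyRange 0 (cd.getD p.1 []).sum 1).foldl
                    (fun acc i => acc ++ [(cur + i * (p.2.length : Int), cur + i * (p.2.length : Int) + (p.2.length : Int))]) []),
                  cur + (cd.getD p.1 []).sum * (p.2.length : Int))
            else (d.insert p.1 [(cur, cur + (p.2.length : Int))], cur + (p.2.length : Int)))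
          = (d.insert p.1 ((PySem.List.pyRange 0 (pvCnt cd p) 1).map
              (fun i => (cur + i * (p.2.length : Int), cur + i * (p.2.length : Int) + (p.2.length : Int)))),
             cur + pvCnt cd p * (p.2.length : Int)) := by
        by_cases h : cd.contains p.1
        · simp only [h, if_true, pvCnt]
          rw [PySem.List.foldl_append_singleton_eq_map]
          simp
        · simp only [h, if_false, Bool.false_eq_true, pvCnt]
          have h1 : PySem.List.pyRange 0 1 1 = [0] := by decide
          rw [h1]
          norm_num
      rw [hvc]
      rw [ih (d.insert p.1 _) (cur + pvCnt cd p * (p.2.length : Int)) ?fresh ?nd]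
      · have hni : d.contains p.1 = false := hfresh p (by simp)
        rw [PySem.Dict.items_insert_of_not_contains] <;>
          first
            | (simp [pvSpec])
            | exact hni
      case fresh =>
        intro q hq
        rw [PySem.Dict.contains_insert]
        have hne : q.1 ≠ p.1 := by
          intro he
          have : p.1 ∈ rest.map (·.1) := he ▸ List.mem_map_of_mem hq
          simp only [List.map_cons, List.nodup_cons] at hnd
          exact hnd.1 this
        simp [hne, hfresh q (List.mem_cons_of_mem _ hq)]
      case nd =>
        simp only [List.map_cons, List.nodup_cons] at hnd
        exact hnd.2

-- B's reverse loop builds exactly the reversed spec list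
lemma pvB (cd : PySem.Dict String (List Int)) :
    ∀ (rs : List (String × List Int)) (acc : List (String × List (Int × Int))) (E : Int),
      rs.foldl
        (fun (st : List (String × List (Int × Int)) × Int) p =>
          let n : Int := (p.2.length : Int)
          let count : Int := if cd.contains p.1 then (cd.getD p.1 []).sum else 1
          let stop := st.2 - count * n
          (st.1 ++ [(p.1, (PySem.List.pyRange 0 count 1).map
              (fun i => (stop + i * n, stop + (i + 1) * n)))], stop))
        (acc, E)
      = (acc ++ (pvSpec cd rs.reverse (E - pvW cd rs.reverse)).reverse, E - pvW cd rs.reverse) := by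
  intro rs
  induction rs with
  | nil => intro acc E; simp [pvSpec, pvW]
  | cons q rs' ih =>
      intro acc E
      simp only [List.foldl_cons]
      rw [show (if cd.contains q.1 then (cd.getD q.1 []).sum else 1) = pvCnt cd q from rfl]
      rw [ih]
      simp only [List.reverse_cons]
      rw [pvSpec_append cd rs'.reverse q, pvW_append cd rs'.reverse q]
      simp only [List.reverse_append, List.reverse_cons, List.reverse_nil, List.nil_append,
        List.singleton_append, List.append_assoc]
      have hmap : (PySem.List.pyRange 0 (pvCnt cd q) 1).map
            (fun i => (E - pvCnt cd q * (q.2.length : Int) + i * (q.2.length : Int),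
                       E - pvCnt cd q * (q.2.length : Int) + (i + 1) * (q.2.length : Int)))
          = (PySem.List.pyRange 0 (pvCnt cd q) 1).map
            (fun i => (E - pvCnt cd q * (q.2.length : Int) + i * (q.2.length : Int),
                       E - pvCnt cd q * (q.2.length : Int) + i * (q.2.length : Int) + (q.2.length : Int))) := by
        apply List.map_congr_left
        intro i _
        simp only [Prod.mk.injEq, true_and]
        ring
      have harg : E - (pvW cd rs'.reverse + pvCnt cd q * (q.2.length : Int)) + pvW cd rs'.reverse
          = E - pvCnt cd q * (q.2.length : Int) := by ring
      have hE : E - (pvW cd rs'.reverse + pvCnt cd q * (q.2.length : Int))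
          = E - pvCnt cd q * (q.2.length : Int) - pvW cd rs'.reverse := by ring
      rw [hmap, harg, hE]

-- a Nodup-keyed entry list survives the final dict round-trip
lemma pvOfListItems (l : List (String × List (Int × Int))) (h : (l.map (·.1)).Nodup) :
    (PySem.Dict.ofList l).items = l := by
  have := PySem.Dict.items_foldl_insert_fresh l (fun p => p.1) (fun p => p.2) PySem.Dict.empty
    (fun a _ => PySem.Dict.contains_empty a.1) h
  simpa using this

-- ===== VERDICT (by name: the statement is the Claim_ definition above) =====
theorem build_particle_slices_py_spec : Claim_equal_build_particle_slices_py := by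
  intro constituents objects_features _
  unfold Spec_build_particle_slices_py build_particle_slices_py build_particle_slices_py_alt
  dsimp only
  set cd := PySem.Dict.ofList constituents with hcd
  set items := (PySem.Dict.ofList objects_features).items with hitems
  have hnd : (items.map (·.1)).Nodup := PySem.Dict.nodup_keys_ofList objects_features
  -- A side
  rw [pvA cd items PySem.Dict.empty 0 (fun p _ => PySem.Dict.contains_empty p.1) hnd]
  -- B side
  rw [show (items.map (fun kv =>
        (if cd.contains kv.1 then (cd.getD kv.1 []).sum else 1) * (kv.2.length : Int))).sum
      = pvW cd items from rfl]
  rw [pvB cd items.reverse [] (pvW cd items)]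
  simp only [List.reverse_reverse, List.nil_append, List.reverse_reverse, sub_self]
  rw [pvOfListItems (pvSpec cd items 0) (by rw [pvSpec_keys]; exact hnd)]
  rfl
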